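-- pv_equiv track=rewrite | github.com/Mario5T/El_Matador | utils.py | contains_vague_source
-- ===== SOURCE A (Python) =====
-- def contains_vague_source(sentence: str) -> bool:
--     """
--     Detect if a sentence contains vague source references.
--
--     Args:
--         sentence: The sentence to check
--
--     Returns:
--         True if vague source references are detected, False otherwise
--     """
--     if not sentence:
--         return False
--
--     vague_source_patterns = [
--         "sources say",
--         "experts claim",
--         "reports suggest",
--         "allegedly",
--         "rumored",
--         "according to sources",
--         "insiders say",
--         "it is believed",
--         "some say",
--         "many believe"
--     ]
--
--     sentence_lower = sentence.lower()
--
--     for pattern in vague_source_patterns: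
--         if pattern in sentence_lower:
--             return True
--
--     return False
-- ===== SOURCE B (Python) =====
-- def contains_vague_source(sentence: str) -> bool:
--     """Position-major single scan: walk the sentence once and at each
--     position ask whether any vague phrase starts there."""
--     patterns = (
--         "sources say",
--         "experts claim",
--         "reports suggest",
--         "allegedly",
--         "rumored",
--         "according to sources",
--         "insiders say",
--         "it is believed",
--         "some say",
--         "many believe",
--     )
--     s = sentence.lower()
--     for i in range(len(s)):
--         if any(s.startswith(p, i) for p in patterns):
--             return True
--     return False
-- ===== Notes on version B (the rewrite author's own statement) =====
-- stated objective: alternative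
-- what changed: Replaces A's pattern-major loop of ten independent substring-containment tests with a single position-major left-to-right scan of the lowercased sentence that asks at each position whether any phrase starts there.
import Mathlib
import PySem

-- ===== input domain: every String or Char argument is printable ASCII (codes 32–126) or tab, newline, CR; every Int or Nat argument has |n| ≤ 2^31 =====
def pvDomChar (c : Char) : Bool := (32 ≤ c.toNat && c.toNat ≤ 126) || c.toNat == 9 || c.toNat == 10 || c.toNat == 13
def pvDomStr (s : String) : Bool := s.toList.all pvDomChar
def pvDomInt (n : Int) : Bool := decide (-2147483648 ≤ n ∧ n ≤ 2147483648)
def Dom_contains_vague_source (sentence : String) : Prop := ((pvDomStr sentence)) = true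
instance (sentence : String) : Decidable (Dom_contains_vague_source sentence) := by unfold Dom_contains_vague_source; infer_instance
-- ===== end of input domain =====

-- B replaces the pattern-major loop of ten substring tests by one position-major
-- scan of the lowercased sentence (objective: alternative traversal, same cost class).

-- The ten vague-source phrases (shared literal data of both programs).
def pvPatterns : List (List Char) :=
  ["sources say".toList, "experts claim".toList, "reports suggest".toList,
   "allegedly".toList, "rumored".toList, "according to sources".toList,
   "insiders say".toList, "it is believed".toList, "some say".toList,
   "many believe".toList]

-- ===== PORT A =====
-- 'for pattern in vague_source_patterns: if pattern in sentence_lower: return True'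
def pvLoopA : List (List Char) → List Char → Bool
  | [], _ => false
  | p :: ps, s => if PySem.Chars.isIn p s then true else pvLoopA ps s

def contains_vague_source (sentence : String) : Bool :=
  if sentence.toList = [] then false
  else pvLoopA pvPatterns (PySem.Chars.lower sentence.toList)

-- ===== PORT B =====
-- 'any(s.startswith(p, i) for p in patterns)' at position i, exact: startswith at i = prefix of drop i
def pvAnyHere (s : List Char) : Bool :=
  pvPatterns.any (fun p => PySem.Chars.startswith s p)

-- 'for i in range(len(s)): …' as recursion over the suffixes of s
def pvLoopB : List Char → Bool
  | [] => false
  | c :: rest => if pvAnyHere (c :: rest) then true else pvLoopB rest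

def contains_vague_source_alt (sentence : String) : Bool :=
  pvLoopB (PySem.Chars.lower sentence.toList)

-- ===== PRECONDITION & SPEC =====
def Spec_contains_vague_source (sentence : String) (out : Bool) : Prop := out = contains_vague_source_alt sentence
instance (sentence : String) (out : Bool) : Decidable (Spec_contains_vague_source sentence out) := by unfold Spec_contains_vague_source; infer_instance

-- ===== CLAIM (what is proved, stated in full; the proofs are below) =====
def Claim_equal_contains_vague_source : Prop := ∀ (sentence : String), Dom_contains_vague_source sentence → Spec_contains_vague_source sentence (contains_vague_source sentence)

-- ===== LEMMAS AND PROOFS =====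

theorem pvLoopA_true_iff (ps : List (List Char)) (s : List Char) :
    pvLoopA ps s = true ↔ ∃ p ∈ ps, p <:+: s := by
  induction ps with
  | nil => simp [pvLoopA]
  | cons p ps ih =>
    by_cases h : PySem.Chars.isIn p s
    · simp [pvLoopA, h, (PySem.Chars.isIn_iff_infix p s).mp h]
    · have hstep : pvLoopA (p :: ps) s = pvLoopA ps s := by simp [pvLoopA, h]
      rw [hstep, ih]
      constructor
      · rintro ⟨q, hq, hinf⟩; exact ⟨q, List.mem_cons_of_mem p hq, hinf⟩
      · rintro ⟨q, hq, hinf⟩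
        rcases List.mem_cons.mp hq with hq | hq
        · exact absurd ((PySem.Chars.isIn_iff_infix q s).mpr hinf) (hq ▸ h)
        · exact ⟨q, hq, hinf⟩

theorem pvAnyHere_true_iff (s : List Char) :
    pvAnyHere s = true ↔ ∃ p ∈ pvPatterns, p <+: s := by
  simp [pvAnyHere, List.any_eq_true, PySem.Chars.startswith_iff]

theorem pvLoopB_true_iff (s : List Char) :
    pvLoopB s = true ↔ ∃ p ∈ pvPatterns, p <:+: s := by
  induction s with
  | nil =>
    simp only [pvLoopB, Bool.false_eq_true, false_iff]
    rintro ⟨p, hp, hinf⟩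
    have : p = [] := List.eq_nil_of_infix_nil hinf
    subst this; revert hp; decide
  | cons c rest ih =>
    by_cases h : pvAnyHere (c :: rest)
    · obtain ⟨p, hp, hpre⟩ := (pvAnyHere_true_iff _).mp h
      simp only [pvLoopB, h, if_pos, true_iff]
      exact ⟨p, hp, hpre.isInfix⟩
    · have hstep : pvLoopB (c :: rest) = pvLoopB rest := by simp [pvLoopB, h]
      rw [hstep, ih]
      constructor
      · rintro ⟨p, hp, hinf⟩; exact ⟨p, hp, hinf.trans (List.suffix_cons c rest).isInfix⟩
      · rintro ⟨p, hp, hinf⟩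
        rcases List.infix_cons_iff.mp hinf with hpre | hinf'
        · exact absurd ((pvAnyHere_true_iff _).mpr ⟨p, hp, hpre⟩) h
        · exact ⟨p, hp, hinf'⟩

-- ===== VERDICT (by name: the statement is the Claim_ definition above) =====
theorem contains_vague_source_spec : Claim_equal_contains_vague_source := by
  intro sentence _
  unfold Spec_contains_vague_source contains_vague_source contains_vague_source_alt
  by_cases hnil : sentence.toList = []
  · simp [hnil, PySem.Chars.lower, pvLoopB]
  · rw [if_neg hnil, Bool.eq_iff_iff, pvLoopA_true_iff, pvLoopB_true_iff]
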